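-- pv_equiv track=rewrite | github.com/VladOgai/csmipt | 2nd semester/3rd week/p2.py | trtr
-- ===== SOURCE A (Python) =====
-- def trtr(arr):
--     if len(arr) == 1:
--         return arr
--     plusarr = []
--     if len(arr) % 2 == 0:
--         for i in range(0, len(arr), 2):
--             plusarr.append([*arr[i], *arr[i + 1]])
--     else:
--         plusarr.append(arr[0])
--         for i in range(1, len(arr), 2):
--             plusarr.append([*arr[i], *arr[i + 1]])
--     return arr + trtr(plusarr)
-- ===== SOURCE B (Python) =====
-- def _pair(level):
--     # merge adjacent pairs working from the RIGHT; an odd leftover (the first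
--     # element) stays alone -- same pairing as A's even/odd index loops
--     if len(level) < 2:
--         return level
--     return _pair(level[:-2]) + [level[-2] + level[-1]]
--
--
-- def trtr(arr):
--     out = []
--     while len(arr) != 1:
--         out += arr
--         arr = _pair(arr)
--     return out + arr
-- ===== Notes on version B (the rewrite author's own statement) =====
-- stated objective: alternative
-- what changed: Replaced A's tail recursion with index-range loops (even/odd range(0,n,2)/range(1,n,2) appends) by an explicit accumulator loop whose levels are built by a structural helper that pairs adjacent elements from the right via slicing (level[:-2] recursion), eliminating index arithmetic and the parity branch.
import Mathlib
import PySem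

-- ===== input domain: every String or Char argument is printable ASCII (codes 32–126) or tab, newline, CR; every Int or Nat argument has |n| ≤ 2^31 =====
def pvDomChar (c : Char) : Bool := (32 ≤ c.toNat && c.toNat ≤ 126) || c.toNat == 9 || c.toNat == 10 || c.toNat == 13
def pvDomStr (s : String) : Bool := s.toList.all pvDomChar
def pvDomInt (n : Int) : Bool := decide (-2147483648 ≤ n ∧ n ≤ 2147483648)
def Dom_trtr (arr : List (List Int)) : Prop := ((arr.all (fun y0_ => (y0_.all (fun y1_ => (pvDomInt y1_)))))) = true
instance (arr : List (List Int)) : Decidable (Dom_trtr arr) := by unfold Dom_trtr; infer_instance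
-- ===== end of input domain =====

-- B replaces A's index-range level construction and tail recursion by a right-to-left
-- structural pairing helper plus an explicit accumulator loop; return values agree on
-- every non-empty input (on [] both Pythons never return).

-- ===== PORT A =====
-- faithful port of A; fuel only totalises the recursion (each level strictly shrinks, so
-- fuel = arr.length is never exhausted on a non-empty input; Python A recurses forever
-- exactly on [], which Pre_trtr excludes)
def trtrFuel : Nat → List (List Int) → List (List Int)
  | 0, _ => []
  | fuel + 1, arr =>
    if arr.length = 1 then arr
    else
      let plusarr : List (List Int) :=
        if arr.length % 2 = 0 then
          (PySem.List.pyRange 0 (arr.length : Int) 2).foldl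
            (fun acc i => acc ++ [PySem.List.pyGetD arr i [] ++ PySem.List.pyGetD arr (i + 1) []]) []
        else
          (PySem.List.pyRange 1 (arr.length : Int) 2).foldl
            (fun acc i => acc ++ [PySem.List.pyGetD arr i [] ++ PySem.List.pyGetD arr (i + 1) []])
            [PySem.List.pyGetD arr 0 []]
      arr ++ trtrFuel fuel plusarr

def trtr (arr : List (List Int)) : List (List Int) := trtrFuel arr.length arr

-- ===== PORT B =====
-- Source B's _pair: merge adjacent pairs from the right via slicing; an odd leftover stays alone
def pairLevel (level : List (List Int)) : List (List Int) :=
  if level.length < 2 then level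
  else
    pairLevel (PySem.List.slice level none (some (-2))) ++
      [PySem.List.pyGetD level (-2) ([] : List Int) ++ PySem.List.pyGetD level (-1) ([] : List Int)]
  termination_by level.length
  decreasing_by
    rw [PySem.List.slice_to_neg_ofNat level 2 (by omega)]
    simp only [List.length_take]
    omega

-- Source B's while loop: 'out' is the accumulator; fuel only totalises the loop (the Python
-- loop never terminates exactly on [], which Pre_trtr excludes)
def trtrLoop : Nat → List (List Int) → List (List Int) → List (List Int)
  | 0, _, out => out
  | fuel + 1, arr, out =>
    if arr.length = 1 then out ++ arr
    else trtrLoop fuel (pairLevel arr) (out ++ arr)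

def trtr_alt (arr : List (List Int)) : List (List Int) := trtrLoop arr.length arr []

-- ===== PRECONDITION & SPEC =====
-- Pre_ excludes only the empty list, on which Python A hits RecursionError (and B's loop never terminates)
def Pre_trtr (arr : List (List Int)) : Prop := arr ≠ []
instance (arr : List (List Int)) : Decidable (Pre_trtr arr) := by unfold Pre_trtr; infer_instance
def pvWitness_trtr : List (List Int) := [[1, 2], [3]]
def Spec_trtr (arr : List (List Int)) (out : List (List Int)) : Prop := out = trtr_alt arr
instance (arr : List (List Int)) (out : List (List Int)) : Decidable (Spec_trtr arr out) := by unfold Spec_trtr; infer_instance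

-- ===== CLAIM (what is proved, stated in full; the proofs are below) =====
def Claim_equal_trtr : Prop := ∀ (arr : List (List Int)), Dom_trtr arr → Pre_trtr arr → Spec_trtr arr (trtr arr)

-- ===== LEMMAS AND PROOFS =====

-- A's plusarr, as a standalone function (definitionally the body of trtrFuel's let)
def plusA (arr : List (List Int)) : List (List Int) :=
  if arr.length % 2 = 0 then
    (PySem.List.pyRange 0 (arr.length : Int) 2).foldl
      (fun acc i => acc ++ [PySem.List.pyGetD arr i [] ++ PySem.List.pyGetD arr (i + 1) []]) []
  else
    (PySem.List.pyRange 1 (arr.length : Int) 2).foldl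
      (fun acc i => acc ++ [PySem.List.pyGetD arr i [] ++ PySem.List.pyGetD arr (i + 1) []])
      [PySem.List.pyGetD arr 0 []]

theorem trtrFuel_succ (fuel : Nat) (arr : List (List Int)) :
    trtrFuel (fuel + 1) arr = if arr.length = 1 then arr else arr ++ trtrFuel fuel (plusA arr) := by
  rw [trtrFuel]; rfl

-- index-free form of A's even-level construction
theorem plusA_even (l : List (List Int)) (h : l.length % 2 = 0) :
    plusA l = (List.range (l.length / 2)).map (fun k => l.getD (2 * k) [] ++ l.getD (2 * k + 1) []) := by
  unfold plusA
  rw [if_pos h, PySem.List.foldl_append_singleton_eq_map, List.nil_append,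
    PySem.List.pyRange_of_pos _ _ (by norm_num : (0:Int) < 2)]
  have hc : (if (0:Int) < (l.length : Int) then (((l.length : Int) - 0 + 2 - 1) / 2).toNat else 0)
      = l.length / 2 := by split_ifs with h' <;> omega
  rw [hc, List.map_map]
  refine List.map_congr_left ?_
  intro k _
  have e1 : (0:Int) + 2 * (k : Int) = ((2 * k : Nat) : Int) := by push_cast; ring
  have e2 : ((2 * k : Nat) : Int) + 1 = ((2 * k + 1 : Nat) : Int) := by push_cast; ring
  simp only [Function.comp, e1, e2, PySem.List.pyGetD_natCast]

-- index-free form of A's odd-level construction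
theorem plusA_odd (l : List (List Int)) (h : l.length % 2 = 1) :
    plusA l = l.getD 0 [] ::
      (List.range (l.length / 2)).map (fun k => l.getD (2 * k + 1) [] ++ l.getD (2 * k + 2) []) := by
  unfold plusA
  rw [if_neg (by omega), PySem.List.foldl_append_singleton_eq_map,
    PySem.List.pyRange_of_pos _ _ (by norm_num : (0:Int) < 2)]
  have hc : (if (1:Int) < (l.length : Int) then (((l.length : Int) - 1 + 2 - 1) / 2).toNat else 0)
      = l.length / 2 := by split_ifs with h' <;> omega
  rw [hc, List.map_map, List.singleton_append]
  congr 1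
  · exact PySem.List.pyGetD_zero l []
  refine List.map_congr_left ?_
  intro k _
  have e1 : (1:Int) + 2 * (k : Int) = ((2 * k + 1 : Nat) : Int) := by push_cast; ring
  have e2 : ((2 * k + 1 : Nat) : Int) + 1 = ((2 * k + 2 : Nat) : Int) := by push_cast; ring
  simp only [Function.comp, e1, e2, PySem.List.pyGetD_natCast]

-- appending one more pair appends one merged block to A's level
theorem plusA_append_two (l : List (List Int)) (a b : List Int) :
    plusA (l ++ [a, b]) = plusA l ++ [a ++ b] := by
  have hlen : (l ++ [a, b]).length = l.length + 2 := by simp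
  have hget : ∀ k, 2 * k + 1 < l.length →
      (l ++ [a, b]).getD (2 * k) [] = l.getD (2 * k) [] ∧
      (l ++ [a, b]).getD (2 * k + 1) [] = l.getD (2 * k + 1) [] :=
    fun k hk => ⟨List.getD_append l [a, b] [] _ (by omega), List.getD_append l [a, b] [] _ hk⟩
  rcases Nat.even_or_odd l.length with he | ho
  · have h0 : l.length % 2 = 0 := Nat.even_iff.mp he
    rw [plusA_even _ (by omega : (l ++ [a, b]).length % 2 = 0), plusA_even _ h0, hlen]
    have hd : (l.length + 2) / 2 = l.length / 2 + 1 := by omega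
    rw [hd, List.range_succ, List.map_append, List.map_singleton]
    congr 1
    · refine List.map_congr_left ?_
      intro k hk
      have hk' : 2 * k + 1 < l.length := by
        have := List.mem_range.mp hk; omega
      rw [(hget k hk').1, (hget k hk').2]
    · have h1 : 2 * (l.length / 2) = l.length := by omega
      rw [h1, List.getD_append_right l [a, b] [] l.length (le_refl _),
        List.getD_append_right l [a, b] [] (l.length + 1) (by omega)]
      simp
  · have h0 : l.length % 2 = 1 := Nat.odd_iff.mp ho
    rw [plusA_odd _ (by omega : (l ++ [a, b]).length % 2 = 1), plusA_odd _ h0, hlen]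
    have hd : (l.length + 2) / 2 = l.length / 2 + 1 := by omega
    rw [hd, List.range_succ, List.map_append, List.map_singleton, List.cons_append]
    congr 1
    · exact List.getD_append l [a, b] [] 0 (by omega)
    congr 1
    · refine List.map_congr_left ?_
      intro k hk
      have hk' : 2 * k + 2 < l.length := by
        have := List.mem_range.mp hk; omega
      exact congrArg₂ _ (List.getD_append l [a, b] [] _ (by omega))
        (List.getD_append l [a, b] [] _ hk')
    · have h1 : 2 * (l.length / 2) + 1 = l.length := by omega
      have h1' : 2 * (l.length / 2) + 2 = l.length + 1 := by omega
      rw [h1, h1', List.getD_append_right l [a, b] [] l.length (le_refl _),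
        List.getD_append_right l [a, b] [] (l.length + 1) (by omega)]
      simp

-- appending one more pair appends one merged block to B's level
theorem pairLevel_append_two (l : List (List Int)) (a b : List Int) :
    pairLevel (l ++ [a, b]) = pairLevel l ++ [a ++ b] := by
  rw [pairLevel]
  have hlen : (l ++ [a, b]).length = l.length + 2 := by simp
  rw [if_neg (by omega)]
  have hs : PySem.List.slice (l ++ [a, b]) none (some (-2)) = l := by
    rw [PySem.List.slice_to_neg_ofNat _ 2 (by omega), hlen]
    simp [List.take_left']
  have h2 : PySem.List.pyGetD (l ++ [a, b]) (-2) ([] : List Int) = a := by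
    rw [PySem.List.pyGetD_neg_ofNat _ 2 _ (by omega) (by simp)]
    simp
  have h1 : PySem.List.pyGetD (l ++ [a, b]) (-1) ([] : List Int) = b := by
    have : l ++ [a, b] = (l ++ [a]) ++ [b] := by simp
    rw [this, PySem.List.pyGetD_neg_one_append_singleton]
  rw [hs, h2, h1]

-- every list is nil, a singleton, or ends in two elements
theorem snoc_two (l : List (List Int)) (h : 2 ≤ l.length) :
    ∃ l' a b, l = l' ++ [a, b] ∧ l'.length + 2 = l.length := by
  match hr : l.reverse with
  | [] =>
    have hlen : l.length = 0 := by rw [← List.length_reverse, hr]; rfl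
    exact absurd h (by omega)
  | [a] =>
    have hlen : l.length = 1 := by rw [← List.length_reverse, hr]; rfl
    exact absurd h (by omega)
  | b :: a :: t =>
    refine ⟨t.reverse, a, b, ?_, ?_⟩
    · rw [← l.reverse_reverse, hr]; simp
    · have := congrArg List.length hr; simp at this ⊢; omega

-- the two level constructions agree on every level
theorem plusA_eq_pairLevel (l : List (List Int)) : plusA l = pairLevel l := by
  by_cases h2 : l.length < 2
  · match l, h2 with
    | [], _ => rw [plusA_even [] (by simp), pairLevel]; simp
    | [x], _ =>
      rw [pairLevel]
      rw [plusA_odd [x] (by simp)]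
      simp
  · obtain ⟨l', a, b, rfl, hl⟩ := snoc_two l (by omega)
    rw [plusA_append_two, pairLevel_append_two, plusA_eq_pairLevel l']
  termination_by l.length
  decreasing_by simp at hl ⊢; omega

-- B's loop with accumulator out computes out ++ A's recursion, fuel for fuel
theorem trtrLoop_eq (fuel : Nat) (arr out : List (List Int)) :
    trtrLoop fuel arr out = out ++ trtrFuel fuel arr := by
  induction fuel generalizing arr out with
  | zero => simp [trtrLoop, trtrFuel]
  | succ fuel ih =>
    rw [trtrLoop, trtrFuel_succ]
    split
    · rfl
    · rw [ih, plusA_eq_pairLevel, List.append_assoc]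

-- ===== VERDICT (by name: the statement is the Claim_ definition above) =====
theorem trtr_spec : Claim_equal_trtr := by
  intro arr _ _
  unfold Spec_trtr trtr_alt trtr
  rw [trtrLoop_eq, List.nil_append]
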